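-- pv_equiv track=rewrite | github.com/thearikdan/MyExperimentalProjects | TextAnalysis/ICCV_abstracts.py | get_group_indices_from_groups
-- ===== SOURCE A (Python) =====
-- def get_group_indices_from_groups(groups):
--     indices = []
--     indices.append(0)
--     current_index = 0
--     count = len(groups)
--     for i in range(1, count):
--         if (groups[i] == groups[i-1]):
--             indices.append(current_index)
--         else:
--             current_index = current_index + 1
--             indices.append(current_index)
--     return indices
-- ===== SOURCE B (Python) =====
-- def get_group_indices_from_groups(groups):
--     # pass 1: boundary deltas; pass 2: prefix-sum them
--     deltas = [0] + [int(b != a) for a, b in zip(groups, groups[1:])]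
--     out = []
--     s = 0
--     for d in deltas:
--         s += d
--         out.append(s)
--     return out
-- ===== Notes on version B (the rewrite author's own statement) =====
-- stated objective: alternative
-- what changed: B splits A's single counter-threading index loop into two passes: build a 0/1 boundary-delta list from adjacent pairs (zip, no indexing), then prefix-sum it.
import Mathlib
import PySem

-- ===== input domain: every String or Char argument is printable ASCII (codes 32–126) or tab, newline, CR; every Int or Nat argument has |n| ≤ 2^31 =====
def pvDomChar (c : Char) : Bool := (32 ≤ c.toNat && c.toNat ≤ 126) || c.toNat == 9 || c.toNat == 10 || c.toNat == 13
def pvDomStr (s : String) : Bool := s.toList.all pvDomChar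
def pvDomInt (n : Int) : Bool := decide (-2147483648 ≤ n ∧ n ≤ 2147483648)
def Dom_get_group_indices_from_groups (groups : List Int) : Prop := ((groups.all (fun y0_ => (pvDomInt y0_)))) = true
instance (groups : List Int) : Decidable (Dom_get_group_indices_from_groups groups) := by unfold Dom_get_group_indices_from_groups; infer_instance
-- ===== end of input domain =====

-- B replaces A's single counter-threading index loop by two passes (adjacent-pair boundary deltas, then a prefix sum); objective: alternative decomposition, same cost.

-- ===== PORT A =====
-- loop body of A; indices i ∈ range(1, len) are always in range, so pyGetD (default 0) is exact here
def pvStepA (groups : List Int) (st : List Int × Int) (i : Int) : List Int × Int :=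
  if PySem.List.pyGetD groups i 0 = PySem.List.pyGetD groups (i - 1) 0 then
    (st.1 ++ [st.2], st.2)
  else
    (st.1 ++ [st.2 + 1], st.2 + 1)

def get_group_indices_from_groups (groups : List Int) : List Int :=
  ((PySem.List.pyRange 1 (groups.length : Int) 1).foldl (pvStepA groups) ([0], 0)).1

-- ===== PORT B =====
-- running prefix sum (the second loop of Source B: s += d; out.append(s))
def pvPrefixSum : Int → List Int → List Int
  | _, [] => []
  | s, d :: ds => (s + d) :: pvPrefixSum (s + d) ds

def get_group_indices_from_groups_alt (groups : List Int) : List Int :=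
  let deltas : List Int :=
    0 :: (groups.zip groups.tail).map (fun p => if p.2 ≠ p.1 then 1 else 0)
  pvPrefixSum 0 deltas

-- ===== PRECONDITION & SPEC =====
def Spec_get_group_indices_from_groups (groups : List Int) (out : List Int) : Prop := out = get_group_indices_from_groups_alt groups
instance (groups : List Int) (out : List Int) : Decidable (Spec_get_group_indices_from_groups groups out) := by unfold Spec_get_group_indices_from_groups; infer_instance

-- ===== CLAIM (what is proved, stated in full; the proofs are below) =====
def Claim_equal_get_group_indices_from_groups : Prop := ∀ (groups : List Int), Dom_get_group_indices_from_groups groups → Spec_get_group_indices_from_groups groups (get_group_indices_from_groups groups)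

-- ===== LEMMAS AND PROOFS =====

-- common reference: group indices of the tail, given the previous element and current index
def pvRef : Int → Int → List Int → List Int
  | _, _, [] => []
  | prev, cur, x :: xs =>
    if x = prev then cur :: pvRef x cur xs else (cur + 1) :: pvRef x (cur + 1) xs

lemma pvB_ref (xs : List Int) : ∀ (prev cur : Int),
    pvPrefixSum cur (((prev :: xs).zip xs).map (fun p => if p.2 ≠ p.1 then 1 else 0))
      = pvRef prev cur xs := by
  induction xs with
  | nil => intro prev cur; rfl
  | cons x xs ih =>
    intro prev cur
    by_cases h : x = prev
    · simpa [List.zip_cons_cons, pvPrefixSum, pvRef, h] using ih x cur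
    · simpa [List.zip_cons_cons, pvPrefixSum, pvRef, h] using ih x (cur + 1)

lemma pvA_ref (groups : List Int) (m : Nat) : ∀ (j : Nat) (acc : List Int) (cur : Int),
    1 ≤ j → j + m = groups.length →
    ((PySem.List.pyRange (j : Int) (groups.length : Int) 1).foldl (pvStepA groups) (acc, cur)).1
      = acc ++ pvRef (groups.getD (j - 1) 0) cur (groups.drop j) := by
  induction m with
  | zero =>
    intro j acc cur hj hm
    have : PySem.List.pyRange (j : Int) (groups.length : Int) 1 = [] := by
      simp [PySem.List.pyRange_one]
      omega
    rw [this]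
    simp [List.drop_of_length_le (by omega : groups.length ≤ j), pvRef]
  | succ m ih =>
    intro j acc cur hj hm
    have hjn : (j : Int) < (groups.length : Int) := by exact_mod_cast (by omega : j < groups.length)
    rw [PySem.List.pyRange_one_cons hjn]
    have hj1 : ((j : Int) + 1) = ((j + 1 : Nat) : Int) := by push_cast; ring
    have hlt : j < groups.length := by omega
    have hdrop : groups.drop j = groups[j] :: groups.drop (j + 1) :=
      (List.getElem_cons_drop hlt).symm
    have hgj : PySem.List.pyGetD groups (j : Int) 0 = groups[j] := by
      rw [PySem.List.pyGetD_natCast]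
      exact List.getD_eq_getElem groups 0 hlt
    have hgj1 : PySem.List.pyGetD groups ((j : Int) - 1) 0 = groups.getD (j - 1) 0 := by
      have : ((j : Int) - 1) = ((j - 1 : Nat) : Int) := by omega
      rw [this, PySem.List.pyGetD_natCast]
    simp only [List.foldl_cons, pvStepA, hgj, hgj1]
    by_cases h : groups[j] = groups.getD (j - 1) 0
    · rw [if_pos h, hj1, ih (j + 1) (acc ++ [cur]) cur (by omega) (by omega)]
      have : groups.getD (j + 1 - 1) 0 = groups[j] := by
        simp [List.getD_eq_getElem?_getD, List.getElem?_eq_getElem hlt]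
      rw [this, hdrop, pvRef, if_pos h]
      simp
    · rw [if_neg h, hj1, ih (j + 1) (acc ++ [cur + 1]) (cur + 1) (by omega) (by omega)]
      have : groups.getD (j + 1 - 1) 0 = groups[j] := by
        simp [List.getD_eq_getElem?_getD, List.getElem?_eq_getElem hlt]
      rw [this, hdrop, pvRef, if_neg h]
      simp

-- ===== VERDICT (by name: the statement is the Claim_ definition above) =====
theorem get_group_indices_from_groups_spec : Claim_equal_get_group_indices_from_groups := by
  intro groups _
  unfold Spec_get_group_indices_from_groups get_group_indices_from_groups get_group_indices_from_groups_alt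
  cases groups with
  | nil => rfl
  | cons g gs =>
    have h := pvA_ref (g :: gs) gs.length 1 [0] 0 (by omega) (by simp; omega)
    simp only [Nat.cast_one] at h
    rw [h]
    exact congrArg (List.cons 0) (pvB_ref gs g 0).symm
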